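-- pv_equiv track=rewrite | github.com/jmbmaluno/Hackenbush_tree | main.py | retirar_pos
-- ===== SOURCE A (Python) =====
-- def retirar_pos(string, i):
--     saida = ""
--     pilha = ['(']
--     cont = 0
--
--     for j in range(len(string)):
--         if j == i:
--             saida = saida + ' '
--         else:
--             if j > i:
--                 if cont == 0:
--                     if string[j] == '(':
--                         pilha.append('(')
--
--                     elif string[j] == ')':
--                         pilha.pop()
--                         if len(pilha) == 0:
--                             cont = 1
--
--                     if len(pilha) == 0:
--                         saida = saida + string[j]
--                     else:
--                         saida = saida + ' '
--
--                 else: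
--                     saida = saida + string[j]
--
--             else:
--                 saida = saida + string[j]
--
--     sem_vazios = ""
--
--     saida = saida.replace(' ', '')
--
--     j = 0
--     while j <  (len(saida)):
--         if saida[j] == '(' and saida[j+1] == ')':
--             j = j + 1
--         else:
--             sem_vazios = sem_vazios + saida[j]
--
--         j = j + 1
--
--
--     return sem_vazios
-- ===== SOURCE B (Python) =====
-- def retirar_pos(string, i):
--     n = len(string)
--     if i >= n:
--         kept = string
--     else:
--         start = i + 1 if i >= 0 else 0
--         depth = 1
--         m = n
--         for j in range(start, n):
--             c = string[j]
--             if c == '(':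
--                 depth += 1
--             elif c == ')':
--                 depth -= 1
--                 if depth == 0:
--                     m = j
--                     break
--         kept = string[:max(i, 0)] + string[m:]
--     kept = kept.replace(' ', '')
--     out = []
--     k = 0
--     while k < len(kept):
--         if kept[k] == '(' and k + 1 < len(kept) and kept[k + 1] == ')':
--             k += 2
--         else:
--             out.append(kept[k])
--             k += 1
--     return ''.join(out)
-- ===== Notes on version B (the rewrite author's own statement) =====
-- stated objective: faster
-- what changed: B replaces A's per-character rebuild with a marker stack and blank sentinels by a single depth-counter scan that finds the removal boundary, one slice concatenation and a space strip, keeping the final adjacent-'()' deletion pass (with a list accumulator instead of repeated string concatenation).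
import Mathlib
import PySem

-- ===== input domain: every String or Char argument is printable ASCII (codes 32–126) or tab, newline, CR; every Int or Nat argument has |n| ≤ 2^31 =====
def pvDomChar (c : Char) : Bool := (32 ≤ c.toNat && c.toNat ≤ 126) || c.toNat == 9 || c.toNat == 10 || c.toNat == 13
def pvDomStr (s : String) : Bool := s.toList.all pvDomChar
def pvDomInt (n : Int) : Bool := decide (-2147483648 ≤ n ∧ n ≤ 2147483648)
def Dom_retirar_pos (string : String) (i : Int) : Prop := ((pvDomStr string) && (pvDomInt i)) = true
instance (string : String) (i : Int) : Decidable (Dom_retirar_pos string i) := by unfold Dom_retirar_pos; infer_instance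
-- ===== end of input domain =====

-- B replaces A's per-character marker/stack rebuild by one depth-counter boundary scan plus a slice
-- (objective: faster — measurably so, by avoiding repeated string concatenation); the final empty-'()'
-- pass is kept. A raises IndexError when the surviving despaced text ends in '(' (excluded by Pre_); B returns it unchanged.

-- ===== PORT A =====

-- A's main for-loop body: state is (saida, pilha, cont); cs.getD j ' ' is string[j]
-- (every j fed in comes from range(len(string)), so it is in range).
def pvBodyA (cs : List Char) (i : Int) (s : List Char × List Char × Nat) (j : Nat) :
    List Char × List Char × Nat :=
  let saida := s.1
  let pilha := s.2.1
  let cont := s.2.2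
  if (j : Int) = i then (saida ++ [' '], pilha, cont)
  else if (j : Int) > i then
    if cont = 0 then
      -- pilha.pop() on an empty pilha is unreachable from the initial state ['('];
      -- dropLast is Python's pop of the last element here.
      let pilha' := if cs.getD j ' ' = '(' then pilha ++ ['(']
                    else if cs.getD j ' ' = ')' then pilha.dropLast else pilha
      let cont' := if cs.getD j ' ' = ')' ∧ pilha'.length = 0 then 1 else cont
      if pilha'.length = 0 then (saida ++ [cs.getD j ' '], pilha', cont')
      else (saida ++ [' '], pilha', cont')
    else (saida ++ [cs.getD j ' '], pilha, cont)
  else (saida ++ [cs.getD j ' '], pilha, cont)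

-- A's second while-loop, as the obvious structural recursion on the remaining characters:
-- at saida[j] = '(' Python reads saida[j+1], which raises IndexError when j+1 = len
-- (excluded by Pre_); the `| _ =>` arm below only makes that read total.
def pvPairA : List Char → List Char
  | [] => []
  | [c] => [c]   -- if c = '(' Python reads saida past the end here: IndexError (excluded by Pre_)
  | c :: d :: rest =>
    if c = '(' ∧ d = ')' then pvPairA rest
    else c :: pvPairA (d :: rest)

def retirar_pos (string : String) (i : Int) : String :=
  let cs := string.toList
  let st := (List.range cs.length).foldl (pvBodyA cs i) ([], ['('], 0)
  let saida := PySem.Chars.replace st.1 [' '] []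
  String.ofList (pvPairA saida)

-- ===== PORT B =====

-- B's boundary scan: depth counter over the remaining characters, returns the absolute
-- index where depth returns to 0, else the index just past the last character.
def pvBound (l : List Char) (idx : Nat) (d : Nat) : Nat :=
  match l, idx, d with
  | [], idx, _ => idx
  | c :: rest, idx, d =>
    if c = '(' then pvBound rest (idx + 1) (d + 1)
    else if c = ')' then (if d = 1 then idx else pvBound rest (idx + 1) (d - 1))
    else pvBound rest (idx + 1) d

-- B's while-loop deleting adjacent '()' pairs (bound-guarded in Source B itself),
-- as structural recursion on the remaining characters.
def pvPairB : List Char → List Char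
  | [] => []
  | [c] => [c]
  | c :: d :: rest =>
    if c = '(' ∧ d = ')' then pvPairB rest
    else c :: pvPairB (d :: rest)

def retirar_pos_alt (string : String) (i : Int) : String :=
  let cs := string.toList
  let n := cs.length
  let kept :=
    if (n : Int) ≤ i then cs
    else
      let start := if 0 ≤ i then i.toNat + 1 else 0
      let m := pvBound (cs.drop start) start 1
      cs.take (if 0 ≤ i then i.toNat else 0) ++ cs.drop m
  let kept' := PySem.Chars.replace kept [' '] []
  String.ofList (pvPairB kept')

-- ===== PRECONDITION & SPEC =====

-- Pre_ excludes exactly the inputs on which the surviving text with all spaces removed ends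
-- in '(' : there Python A's second loop reads saida[j+1] past the end and raises IndexError.
-- The removal boundary is stated declaratively: the first index j at or after the blanked
-- position whose prefix holds one more ')' than '('.
def Pre_retirar_pos (string : String) (i : Int) : Prop :=
  let cs := string.toList
  let start := if 0 ≤ i then i.toNat + 1 else 0
  let m := ((List.range' start (cs.length - start)).find? (fun j =>
      ((cs.drop start).take (j + 1 - start)).count ')'
        = ((cs.drop start).take (j + 1 - start)).count '(' + 1)).getD cs.length
  let kept := if (cs.length : Int) ≤ i then cs
              else cs.take (if 0 ≤ i then i.toNat else 0) ++ cs.drop m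
  (kept.filter (fun c => c ≠ ' ')).getLast? ≠ some '('
instance (string : String) (i : Int) : Decidable (Pre_retirar_pos string i) := by
  unfold Pre_retirar_pos; infer_instance

def pvWitness_retirar_pos : String × Int := ("(a(b)c)", 2)

def Spec_retirar_pos (string : String) (i : Int) (out : String) : Prop := out = retirar_pos_alt string i
instance (string : String) (i : Int) (out : String) : Decidable (Spec_retirar_pos string i out) := by
  unfold Spec_retirar_pos; infer_instance

-- ===== CLAIM (what is proved, stated in full; the proofs are below) =====
def Claim_equal_retirar_pos : Prop := ∀ (string : String) (i : Int), Dom_retirar_pos string i → Pre_retirar_pos string i → Spec_retirar_pos string i (retirar_pos string i)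

-- ===== LEMMAS AND PROOFS =====

-- The two empty-'()' passes are the same loop.
theorem pvPair_eq (s : List Char) : pvPairA s = pvPairB s := by
  fun_induction pvPairA s <;> simp_all [pvPairB]

-- str.replace(' ', '') deletes exactly the spaces.
theorem replace_go_spec (fuel : Nat) (l acc : List Char) (h : l.length ≤ fuel) :
    PySem.Chars.replace.go [' '] [] fuel l acc =
      acc.reverse ++ l.filter (fun c => c ≠ ' ') := by
  induction fuel generalizing l acc with
  | zero => cases l with
    | nil => simp [PySem.Chars.replace.go]
    | cons c t => simp at h
  | succ fuel ih =>
    cases l with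
    | nil => simp [PySem.Chars.replace.go]
    | cons c t =>
      by_cases hc : c = ' '
      · subst hc
        simp [PySem.Chars.replace.go, List.isPrefixOf, ih t acc (by simpa using Nat.le_of_succ_le_succ (by simpa using h))]
      · simp [PySem.Chars.replace.go, List.isPrefixOf, hc, Ne.symm hc,
          ih t (c :: acc) (by simpa using Nat.le_of_succ_le_succ (by simpa using h))]

theorem replace_filter (s : List Char) :
    PySem.Chars.replace s [' '] [] = s.filter (fun c => c ≠ ' ') := by
  simpa using replace_go_spec s.length s [] le_rfl

theorem pvBound_ge (l : List Char) (idx d : Nat) : idx ≤ pvBound l idx d := by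
  fun_induction pvBound l idx d <;> omega

-- reading the characters at in-range indices is slicing
theorem map_getD_range' (cs : List Char) (s k : Nat) (h : s + k ≤ cs.length) :
    (List.range' s k).map (fun j => cs.getD j ' ') = (cs.drop s).take k := by
  induction k generalizing s with
  | zero => simp
  | succ k ih =>
    rw [List.range'_succ, List.map_cons, List.drop_eq_getElem_cons (by omega),
      List.take_succ_cons, ih (s + 1) (by omega), List.getD_eq_getElem cs ' ' (by omega)]

-- phase 1: indices strictly below i copy the character, stack and cont untouched
theorem foldl_low (cs : List Char) (i : Int) (s k : Nat) (sa p : List Char) (c : Nat)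
    (h : (s : Int) + k ≤ i) :
    (List.range' s k).foldl (pvBodyA cs i) (sa, p, c) =
      (sa ++ (List.range' s k).map (fun j => cs.getD j ' '), p, c) := by
  induction k generalizing s sa with
  | zero => simp
  | succ k ih =>
    rw [List.range'_succ, List.foldl_cons, List.map_cons]
    have h1 : ¬ ((s : Int) = i) := by push_cast at h ⊢; omega
    have h2 : ¬ ((s : Int) > i) := by push_cast at h ⊢; omega
    rw [show pvBodyA cs i (sa, p, c) s = (sa ++ [cs.getD s ' '], p, c) by
      simp [pvBodyA, h1, h2]]
    rw [ih (s + 1) _ (by push_cast at h ⊢; omega)]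
    simp

-- phase 3 after the stack emptied (cont ≠ 0): characters are copied unchanged
theorem foldl_tail (cs : List Char) (i : Int) (s k : Nat) (sa p : List Char) (c : Nat)
    (hc : c ≠ 0) (hi : i < (s : Int)) :
    (List.range' s k).foldl (pvBodyA cs i) (sa, p, c) =
      (sa ++ (List.range' s k).map (fun j => cs.getD j ' '), p, c) := by
  induction k generalizing s sa with
  | zero => simp
  | succ k ih =>
    rw [List.range'_succ, List.foldl_cons, List.map_cons]
    have h1 : ¬ ((s : Int) = i) := by omega
    have h2 : (s : Int) > i := hi
    rw [show pvBodyA cs i (sa, p, c) s = (sa ++ [cs.getD s ' '], p, c) by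
      simp [pvBodyA, h1, h2, hc]]
    rw [ih (s + 1) _ (by push_cast at hi ⊢; omega)]
    simp

-- phase 2 (the marker stack active): outputs blanks until the depth counter of B's
-- boundary scan returns to 0, then the rest of the string verbatim
theorem foldl_high (cs : List Char) (i : Int) (k : Nat) :
    ∀ (s : Nat) (sa p : List Char), i < (s : Int) → s + k = cs.length → 1 ≤ p.length →
    ((List.range' s k).foldl (pvBodyA cs i) (sa, p, 0)).1 =
      sa ++ List.replicate (pvBound (cs.drop s) s p.length - s) ' '
         ++ cs.drop (pvBound (cs.drop s) s p.length) := by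
  induction k with
  | zero =>
    intro s sa p hi hs hp
    simp [List.drop_eq_nil_iff.mpr (show cs.length ≤ s by omega), pvBound]
  | succ k ih =>
    intro s sa p hi hs hp
    have hslt : s < cs.length := by omega
    have hdrop : cs.drop s = cs[s] :: cs.drop (s + 1) := List.drop_eq_getElem_cons hslt
    have hsome : cs[s]? = some cs[s] := List.getElem?_eq_getElem hslt
    have h1 : ¬ ((s : Int) = i) := by omega
    have h2 : (s : Int) > i := hi
    rw [List.range'_succ, List.foldl_cons]
    by_cases hpar : cs[s] = '('
    · -- push: depth grows, blank emitted
      rw [show pvBodyA cs i (sa, p, 0) s = (sa ++ [' '], p ++ ['('], 0) by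
        simp [pvBodyA, h1, h2, hsome, hpar]]
      rw [ih (s + 1) (sa ++ [' ']) (p ++ ['(']) (by omega) (by omega) (by simp)]
      rw [hdrop, show pvBound (cs[s] :: cs.drop (s + 1)) s p.length
            = pvBound (cs.drop (s + 1)) (s + 1) (p.length + 1) by
          simp [pvBound, hpar], List.length_append]
      have hge := pvBound_ge (cs.drop (s + 1)) (s + 1) (p.length + 1)
      rw [show pvBound (cs.drop (s+1)) (s+1) (p.length+1) - s
            = (pvBound (cs.drop (s+1)) (s+1) (p.length+1) - (s+1)) + 1 by omega]
      simp [List.replicate_succ]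
    · by_cases hclo : cs[s] = ')'
      · by_cases hone : p.length = 1
        · -- the stack empties: this ')' survives, cont flips to 1, rest copied
          have hnil : p.dropLast = [] := by
            have h3 : p.dropLast.length = p.length - 1 := List.length_dropLast
            exact List.eq_nil_of_length_eq_zero (by omega)
          rw [show pvBodyA cs i (sa, p, 0) s = (sa ++ [cs[s]], p.dropLast, 1) by
            simp [pvBodyA, h1, h2, hsome, hclo, hnil]]
          rw [foldl_tail cs i (s + 1) k _ _ 1 one_ne_zero (by omega),
            map_getD_range' cs (s + 1) k (by omega),
            List.take_of_length_le (by rw [List.length_drop]; omega),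
            hdrop, show pvBound (cs[s] :: cs.drop (s + 1)) s p.length = s by
              simp [pvBound, hclo, hone]]
          simp
        · -- pop with depth still positive: blank emitted
          have hlen : ¬ (p.length - 1 = 0) := by omega
          have h3 : p.dropLast.length = p.length - 1 := List.length_dropLast
          rw [show pvBodyA cs i (sa, p, 0) s = (sa ++ [' '], p.dropLast, 0) by
            simp [pvBodyA, h1, h2, hsome, hclo, h3, hlen]]
          rw [ih (s + 1) (sa ++ [' ']) p.dropLast (by omega) (by omega) (by omega)]
          rw [hdrop, show pvBound (cs[s] :: cs.drop (s + 1)) s p.length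
                = pvBound (cs.drop (s + 1)) (s + 1) (p.length - 1) by
              simp [pvBound, hclo, hone], h3]
          have hge := pvBound_ge (cs.drop (s + 1)) (s + 1) (p.length - 1)
          rw [show pvBound (cs.drop (s+1)) (s+1) (p.length-1) - s
                = (pvBound (cs.drop (s+1)) (s+1) (p.length-1) - (s+1)) + 1 by omega]
          simp [List.replicate_succ]
      · -- any other character: blank emitted, stack untouched
        have hpnil : p ≠ [] := by intro hh; rw [hh] at hp; simp at hp
        rw [show pvBodyA cs i (sa, p, 0) s = (sa ++ [' '], p, 0) by
          simp [pvBodyA, h1, h2, hsome, hpar, hclo, hpnil]]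
        rw [ih (s + 1) (sa ++ [' ']) p (by omega) (by omega) hp]
        rw [hdrop, show pvBound (cs[s] :: cs.drop (s + 1)) s p.length
              = pvBound (cs.drop (s + 1)) (s + 1) p.length by
            simp [pvBound, hpar, hclo]]
        have hge := pvBound_ge (cs.drop (s + 1)) (s + 1) p.length
        rw [show pvBound (cs.drop (s+1)) (s+1) p.length - s
              = (pvBound (cs.drop (s+1)) (s+1) p.length - (s+1)) + 1 by omega]
        simp [List.replicate_succ]

theorem range'_split (t n : Nat) (h : t ≤ n) :
    List.range' 0 n = List.range' 0 t ++ List.range' t (n - t) := by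
  conv_lhs => rw [show n = t + (n - t) by omega, ← List.range'_append (s := 0) (step := 1)]
  simp

-- the despaced survivors agree
theorem filter_saida_eq (string : String) (i : Int) :
    (((List.range string.toList.length).foldl (pvBodyA string.toList i) ([], ['('], 0)).1).filter
        (fun c => c ≠ ' ') =
      ((if (string.toList.length : Int) ≤ i then string.toList
        else string.toList.take (if 0 ≤ i then i.toNat else 0) ++
          string.toList.drop (pvBound (string.toList.drop (if 0 ≤ i then i.toNat + 1 else 0))
            (if 0 ≤ i then i.toNat + 1 else 0) 1)).filter (fun c => c ≠ ' ')) := by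
  by_cases hge : (string.toList.length : Int) ≤ i
  · -- i past the end: every character is copied verbatim
    rw [if_pos hge, List.range_eq_range',
      foldl_low string.toList i 0 string.toList.length [] ['('] 0 (by push_cast; omega),
      map_getD_range' string.toList 0 string.toList.length (by omega)]
    simp [List.take_of_length_le]
  · by_cases hnn : 0 ≤ i
    · -- 0 ≤ i < len: copy, blank at i, blank until the boundary, copy the rest
      have ht : ((i.toNat : Nat) : Int) = i := Int.toNat_of_nonneg hnn
      rw [if_neg hge, if_pos hnn, if_pos hnn, List.range_eq_range',
        range'_split i.toNat string.toList.length (by omega),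
        show string.toList.length - i.toNat = (string.toList.length - i.toNat - 1) + 1 by omega,
        List.range'_succ, List.foldl_append, List.foldl_cons,
        foldl_low string.toList i 0 i.toNat [] ['('] 0 (by omega),
        map_getD_range' string.toList 0 i.toNat (by omega)]
      rw [show pvBodyA string.toList i
            (([] : List Char) ++ (string.toList.drop 0).take i.toNat, ['('], 0) i.toNat
            = ((([] : List Char) ++ (string.toList.drop 0).take i.toNat) ++ [' '], ['('], 0) by
          simp [pvBodyA, ht]]
      rw [foldl_high string.toList i (string.toList.length - i.toNat - 1) (i.toNat + 1)
        _ ['('] (by omega) (by omega) (by simp)]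
      simp [List.filter_append]
    · -- i negative: the blanking machinery runs from index 0
      rw [if_neg hge, if_neg hnn, if_neg hnn, List.range_eq_range',
        foldl_high string.toList i string.toList.length 0 [] ['('] (by omega) (by omega)
          (by simp)]
      simp [List.filter_append]

theorem pv_main (string : String) (i : Int) : retirar_pos string i = retirar_pos_alt string i := by
  have h := filter_saida_eq string i
  simp only [retirar_pos, retirar_pos_alt]
  rw [replace_filter, replace_filter, pvPair_eq, h]

-- ===== VERDICT (by name: the statement is the Claim_ definition above) =====
theorem retirar_pos_spec : Claim_equal_retirar_pos := by
  intro string i _ _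
  unfold Spec_retirar_pos
  exact pv_main string i
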